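-- pv_equiv track=rewrite | github.com/aiguy110/advent-of-code-2020 | day_17/solution2.py | get_adjacent_cells
-- ===== SOURCE A (Python) =====
-- def get_adjacent_cells(cell):
--     i, j, k, l = cell
--     for di in [-1, 0, 1]:
--         for dj in [-1, 0, 1]:
--             for dk in [-1, 0, 1]:
--                 for dl in [-1, 0, 1]:
--                     if di == 0 and dj == 0 and dk == 0 and dl == 0:
--                         continue
--
--                     yield (i+di, j+dj, k+dk, l+dl)
-- ===== SOURCE B (Python) =====
-- def get_adjacent_cells(cell):
--     i, j, k, l = cell
--     for idx in range(81):
--         if idx == 40: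
--             continue
--         yield (i + idx // 27 - 1,
--                j + (idx // 9) % 3 - 1,
--                k + (idx // 3) % 3 - 1,
--                l + idx % 3 - 1)
-- ===== Notes on version B (the rewrite author's own statement) =====
-- stated objective: alternative
-- what changed: Replaces the four nested offset loops by a single loop over range(81) that decodes each flat index into the four offsets via base-3 digit arithmetic and skips index 40 (the center).
import Mathlib
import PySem

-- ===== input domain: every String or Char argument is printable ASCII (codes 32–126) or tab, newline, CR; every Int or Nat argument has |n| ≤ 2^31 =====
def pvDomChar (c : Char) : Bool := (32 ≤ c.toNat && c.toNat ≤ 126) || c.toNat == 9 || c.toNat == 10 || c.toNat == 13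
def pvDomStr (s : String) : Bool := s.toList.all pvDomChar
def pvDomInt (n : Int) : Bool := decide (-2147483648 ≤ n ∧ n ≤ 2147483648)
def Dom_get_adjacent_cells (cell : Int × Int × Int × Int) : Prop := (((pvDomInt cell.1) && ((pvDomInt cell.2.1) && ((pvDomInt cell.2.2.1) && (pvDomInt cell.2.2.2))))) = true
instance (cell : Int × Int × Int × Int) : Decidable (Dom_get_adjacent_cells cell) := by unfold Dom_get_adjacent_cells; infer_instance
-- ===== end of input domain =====

-- ===== PORT A =====
-- B enumerates the 80 neighbours by decoding a flat index 0..80 (base-3 digits) in one loop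
-- instead of A's four nested loops; return-value equivalence (both ports materialise the yields as a list).
def get_adjacent_cells (cell : Int × Int × Int × Int) : List (Int × Int × Int × Int) :=
  let (i, j, k, l) := cell
  ([-1, 0, 1] : List Int).foldl (fun acc di =>
    ([-1, 0, 1] : List Int).foldl (fun acc dj =>
      ([-1, 0, 1] : List Int).foldl (fun acc dk =>
        ([-1, 0, 1] : List Int).foldl (fun acc dl =>
          if di == 0 && dj == 0 && dk == 0 && dl == 0 then acc
          else acc ++ [(i + di, j + dj, k + dk, l + dl)]) acc) acc) acc) []

-- ===== PORT B =====
def get_adjacent_cells_alt (cell : Int × Int × Int × Int) : List (Int × Int × Int × Int) :=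
  let (i, j, k, l) := cell
  (PySem.List.pyRange 0 81 1).foldl (fun acc idx =>
    if idx == 40 then acc
    else acc ++ [(i + PySem.Int.floordiv idx 27 - 1,
                  j + PySem.Int.mod (PySem.Int.floordiv idx 9) 3 - 1,
                  k + PySem.Int.mod (PySem.Int.floordiv idx 3) 3 - 1,
                  l + PySem.Int.mod idx 3 - 1)]) []

-- ===== PRECONDITION & SPEC =====
def Spec_get_adjacent_cells (cell : Int × Int × Int × Int) (out : List (Int × Int × Int × Int)) : Prop := out = get_adjacent_cells_alt cell
instance (cell : Int × Int × Int × Int) (out : List (Int × Int × Int × Int)) : Decidable (Spec_get_adjacent_cells cell out) := by unfold Spec_get_adjacent_cells; infer_instance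

-- ===== CLAIM (what is proved, stated in full; the proofs are below) =====
def Claim_equal_get_adjacent_cells : Prop := ∀ (cell : Int × Int × Int × Int), Dom_get_adjacent_cells cell → Spec_get_adjacent_cells cell (get_adjacent_cells cell)

-- ===== LEMMAS AND PROOFS =====

-- ===== VERDICT (by name: the statement is the Claim_ definition above) =====
theorem get_adjacent_cells_spec : Claim_equal_get_adjacent_cells := by
  intro cell _
  obtain ⟨i, j, k, l⟩ := cell
  show get_adjacent_cells _ = get_adjacent_cells_alt _
  simp [get_adjacent_cells, get_adjacent_cells_alt, PySem.List.pyRange,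
        PySem.Int.floordiv, PySem.Int.mod, List.range_succ]
  omega
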